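-- pv_equiv track=rewrite | github.com/tweber36/CodinGame | MEDIUM_StockExchangeLosses.py | calculate_max_loss
-- ===== SOURCE A (Python) =====
-- def calculate_max_loss(prices, loss=0):
--     """
--     Fonction récursive qui:
--     _ Cherche le minimum
--     _ Coupe la liste en 2 à cet endroit
--     _ Calcule le plus grand écart sur la partie gauche et compare avec les écarts précédents pour garder le pire
--     _ Renvoie cette fonction sur la partie droite, avec le plus gros écart en paramèetre
--     """
--
--     min_price = min(prices) # On cherche le minimum de la liste
--
--     if len(prices) <= 1:
--         # Si la liste ne contient plus qu'un élément, on arrête la récursivité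
--         return min(loss, 0)
--     elif prices.index(min_price) == 0:
--         # Si le minimum est à gauche, on recalcule sans cet élément
--         # (puisqu'on trouvera forcément un meilleur écart ou égal)
--         return calculate_max_loss(prices[1:], loss)
--     elif prices.index(min_price) == len(prices) - 1:
--         # Si le minimum est à droite, on n'a plus besoin de couper la liste en 2, on renvoie le min - max
--         return min(loss, 0, min_price-max(prices))
--     else:
--         # Cas normal, minimum au milieu
--         llist = prices[:prices.index(min_price)]
--         rlist = prices[prices.index(min_price)+1:]
--         return calculate_max_loss(rlist, min(0, loss, min_price - max(llist)))
-- ===== SOURCE B (Python) =====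
-- def calculate_max_loss(prices, loss=0):
--     # One pass: track the running maximum and the worst (most negative) drop seen so far.
--     res = min(loss, 0)
--     mx = prices[0]
--     for p in prices[1:]:
--         if p - mx < res:
--             res = p - mx
--         if p > mx:
--             mx = p
--     return res
-- ===== Notes on version B (the rewrite author's own statement) =====
-- stated objective: faster
-- what changed: Replaced A's recursive split-at-the-minimum scheme (each level rescans the list with min/index/max and slices it) by a single left-to-right pass that tracks the running maximum and the worst drop seen so far.
-- outside the precondition, e.g. on calculate_max_loss([], 0): A raises ValueError, B raises IndexError
import Mathlib
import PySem

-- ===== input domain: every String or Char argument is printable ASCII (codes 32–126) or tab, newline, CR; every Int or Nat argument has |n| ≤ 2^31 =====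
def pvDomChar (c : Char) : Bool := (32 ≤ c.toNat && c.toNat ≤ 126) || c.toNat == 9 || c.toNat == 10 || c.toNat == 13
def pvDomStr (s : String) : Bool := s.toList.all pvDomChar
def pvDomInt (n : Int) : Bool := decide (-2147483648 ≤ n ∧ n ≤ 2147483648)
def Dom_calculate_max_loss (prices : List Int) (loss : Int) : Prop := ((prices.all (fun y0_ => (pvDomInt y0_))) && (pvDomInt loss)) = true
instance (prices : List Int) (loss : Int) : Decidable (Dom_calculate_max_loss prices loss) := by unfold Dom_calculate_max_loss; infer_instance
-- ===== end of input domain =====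

-- B replaces A's recursive split-at-the-minimum scheme (repeated min/index/max scans) by a
-- single left-to-right pass tracking the running maximum and the worst drop (objective: faster).

-- ===== PORT A =====
-- Literal port of A's recursion: find the minimum, branch on its first index, split there.
def calculate_max_loss (prices : List Int) (loss : Int) : Int :=
  -- min(prices): raises ValueError on []; excluded by Pre_, the .getD default is never used
  let min_price := (PySem.List.min? prices (fun x => x)).getD 0
  if _h1 : prices.length ≤ 1 then
    min loss 0
  else if _h2 : PySem.List.index? prices min_price = some 0 then
    calculate_max_loss (PySem.List.slice prices (some 1) none) loss
  else if _h3 : PySem.List.index? prices min_price = some (prices.length - 1) then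
    min (min loss 0) (min_price - (PySem.List.max? prices (fun x => x)).getD 0)
  else
    let k := (PySem.List.index? prices min_price).getD 0
    let llist := PySem.List.slice prices none (some (k : Int))
    let rlist := PySem.List.slice prices (some ((k : Int) + 1)) none
    calculate_max_loss rlist (min (min 0 loss) (min_price - (PySem.List.max? llist (fun x => x)).getD 0))
termination_by prices.length
decreasing_by
  · simp [PySem.List.slice_from_one]
    omega
  · rw [PySem.List.slice_from _ (by positivity)]
    simp [List.length_drop]
    omega

-- ===== PORT B =====
-- Literal port of Source B: res = min(loss, 0); mx = prices[0]; one pass over prices[1:].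
def calculate_max_loss_alt (prices : List Int) (loss : Int) : Int :=
  match prices with
  | [] => 0  -- prices[0] raises IndexError on []; excluded by Pre_
  | p :: _ =>
    ((PySem.List.slice prices (some 1) none).foldl
      (fun (s : Int × Int) x =>
        (if x - s.2 < s.1 then x - s.2 else s.1, if s.2 < x then x else s.2))
      (min loss 0, p)).1

-- ===== PRECONDITION & SPEC =====
-- Pre_ excludes only the empty list, on which both Pythons raise (ValueError in A, IndexError in B).
def Pre_calculate_max_loss (prices : List Int) (_loss : Int) : Prop := prices ≠ []
instance (prices : List Int) (loss : Int) : Decidable (Pre_calculate_max_loss prices loss) := by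
  unfold Pre_calculate_max_loss; infer_instance
def pvWitness_calculate_max_loss : List Int × Int := ([3, 1, 4, 1, 5], 0)

def Spec_calculate_max_loss (prices : List Int) (loss : Int) (out : Int) : Prop := out = calculate_max_loss_alt prices loss
instance (prices : List Int) (loss : Int) (out : Int) : Decidable (Spec_calculate_max_loss prices loss out) := by unfold Spec_calculate_max_loss; infer_instance

-- ===== CLAIM (what is proved, stated in full; the proofs are below) =====
def Claim_equal_calculate_max_loss : Prop := ∀ (prices : List Int) (loss : Int), Dom_calculate_max_loss prices loss → Pre_calculate_max_loss prices loss → Spec_calculate_max_loss prices loss (calculate_max_loss prices loss)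

-- ===== LEMMAS AND PROOFS =====

-- F mx xs : the minimum, over the positions j of xs, of xs[j] minus the running maximum of
-- mx and the elements before position j (⊤ when xs is empty).  Both ports compute
-- min (min loss 0) (F (head prices) (tail prices)); all lemmas below are about F.
def pvF : Int → List Int → WithTop Int
  | _, [] => ⊤
  | mx, x :: xs => min ((x - mx : Int) : WithTop Int) (pvF (max mx x) xs)

theorem pvF_cons (mx x : Int) (xs : List Int) :
    pvF mx (x :: xs) = min ((x - mx : Int) : WithTop Int) (pvF (max mx x) xs) := rfl

theorem pvF_single (mx y : Int) : pvF mx [y] = ((y - mx : Int) : WithTop Int) := by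
  simp [pvF]

theorem pvF_append (xs ys : List Int) : ∀ mx : Int,
    pvF mx (xs ++ ys) = min (pvF mx xs) (pvF (xs.foldl max mx) ys) := by
  induction xs with
  | nil => intro mx; simp [pvF]
  | cons x t ih =>
    intro mx
    simp only [List.cons_append, pvF_cons, List.foldl_cons, ih (max mx x), min_assoc]

theorem pvF_mono (xs : List Int) : ∀ {a b : Int}, a ≤ b → pvF b xs ≤ pvF a xs := by
  induction xs with
  | nil => intro a b _; simp [pvF]
  | cons x t ih =>
    intro a b hab
    simp only [pvF_cons]
    exact min_le_min (by exact_mod_cast by omega) (ih (max_le_max hab le_rfl))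

theorem pvF_ge (m K : Int) (xs : List Int) (hm : ∀ x ∈ xs, m ≤ x) (hK : ∀ x ∈ xs, x ≤ K) :
    ∀ mx : Int, mx ≤ K → ((m - K : Int) : WithTop Int) ≤ pvF mx xs := by
  induction xs with
  | nil => intro mx _; simp [pvF]
  | cons x t ih =>
    intro mx hmx
    simp only [pvF_cons, le_min_iff]
    constructor
    · have h1 := hm x (by simp)
      exact_mod_cast (by omega : m - K ≤ x - mx)
    · exact ih (fun y hy => hm y (by simp [hy])) (fun y hy => hK y (by simp [hy]))
        (max mx x) (max_le hmx (hK x (by simp)))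

theorem pv_sub_max (x a b : Int) :
    ((x - max a b : Int) : WithTop Int) = min ((x - a : Int) : WithTop Int) ((x - b : Int) : WithTop Int) := by
  rcases le_total a b with h | h
  · rw [max_eq_right h, ← WithTop.coe_min, min_eq_right (by omega)]
  · rw [max_eq_left h, ← WithTop.coe_min, min_eq_left (by omega)]

theorem pvF_key (m : Int) (xs : List Int) (hm : ∀ x ∈ xs, m ≤ x) :
    ∀ mx' mx : Int, min ((m - mx' : Int) : WithTop Int) (pvF mx xs) ≤ pvF (max mx' mx) xs := by
  induction xs with
  | nil => intro mx' mx; simp [pvF]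
  | cons x t ih =>
    intro mx' mx
    simp only [pvF_cons, le_min_iff]
    constructor
    · rw [pv_sub_max]
      rcases min_cases ((x - mx' : Int) : WithTop Int) ((x - mx : Int) : WithTop Int) with
        ⟨h, _⟩ | ⟨h, _⟩
      · rw [h]
        refine le_trans (min_le_left _ _) (WithTop.coe_le_coe.mpr ?_)
        have := hm x (by simp); omega
      · rw [h]
        exact le_trans (min_le_right _ _) (min_le_left _ _)
    · have hmax : max (max mx' mx) x = max mx' (max mx x) := by
        rw [max_assoc]
      rw [hmax]
      refine le_trans ?_ (ih (fun y hy => hm y (by simp [hy])) mx' (max mx x))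
      exact min_le_min le_rfl (min_le_right _ _)

-- B's loop computes min res (pvF mx ps)
theorem pv_loop_eq (ps : List Int) : ∀ (res mx : Int),
    (((ps.foldl
      (fun (s : Int × Int) x =>
        (if x - s.2 < s.1 then x - s.2 else s.1, if s.2 < x then x else s.2))
      (res, mx)).1 : Int) : WithTop Int) = min (res : WithTop Int) (pvF mx ps) := by
  induction ps with
  | nil => intro res mx; simp [pvF]
  | cons x t ih =>
    intro res mx
    simp only [List.foldl_cons]
    have e1 : (if x - mx < res then x - mx else res) = min res (x - mx) := by
      rcases le_total res (x - mx) with h | h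
      · rw [min_eq_left h, if_neg (by omega)]
      · rw [min_eq_right h]
        rcases lt_or_ge (x - mx) res with h' | h'
        · rw [if_pos h']
        · rw [if_neg (by omega)]; omega
    have e2 : (if mx < x then x else mx) = max mx x := by
      rcases le_total mx x with h | h
      · rw [max_eq_right h]
        rcases lt_or_ge mx x with h' | h'
        · rw [if_pos h']
        · rw [if_neg (by omega)]; omega
      · rw [max_eq_left h, if_neg (by omega)]
    rw [e1, e2, ih]
    simp only [pvF_cons, WithTop.coe_min, min_assoc]

theorem pv_alt_eq (p : Int) (ps : List Int) (loss : Int) :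
    ((calculate_max_loss_alt (p :: ps) loss : Int) : WithTop Int)
      = min ((min loss 0 : Int) : WithTop Int) (pvF p ps) := by
  show (((PySem.List.slice (p :: ps) (some 1) none).foldl _ (min loss 0, p)).1 : WithTop Int) = _
  rw [PySem.List.slice_from_one]
  exact pv_loop_eq ps (min loss 0) p

-- first-match index: the element at the reported index is the value searched for
theorem pv_index?_getElem? {xs : List Int} {v : Int} : ∀ {k : Nat},
    PySem.List.index? xs v = some k → xs[k]? = some v := by
  induction xs with
  | nil => intro k h; simp [PySem.List.index?_eq_idxOf?, List.idxOf?] at h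
  | cons x t ih =>
    intro k h
    by_cases hx : x = v
    · subst hx
      rw [PySem.List.index?_cons_self] at h
      injection h with h
      subst h
      simp
    · rw [PySem.List.index?_cons_of_ne t hx] at h
      rcases k with _ | k
      · simp at h
      · simp only [Option.map_eq_some_iff] at h
        obtain ⟨j, hj, hjk⟩ := h
        have : j = k := by omega
        subst this
        simpa using ih hj

theorem pv_A_eq : ∀ (n : Nat) (p : Int) (ps : List Int), (p :: ps).length ≤ n → ∀ loss : Int,
    ((calculate_max_loss (p :: ps) loss : Int) : WithTop Int)
      = min ((min loss 0 : Int) : WithTop Int) (pvF p ps) := by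
  intro n
  induction n with
  | zero => intro p ps hlen; simp at hlen
  | succ n ih =>
    intro p ps hlen loss
    have hmle : ∀ x ∈ p :: ps, List.foldl min p ps ≤ x := by
      intro x hx
      rcases List.mem_cons.mp hx with h | h
      · exact h ▸ (PySem.List.foldl_min_le ps p).1
      · exact (PySem.List.foldl_min_le ps p).2 x h
    rw [calculate_max_loss]
    simp only [PySem.List.min?_id_cons, Option.getD_some]
    split_ifs with h1 h2 h3
    · -- length ≤ 1 : ps = []
      have hps : ps = [] := by
        cases ps with
        | nil => rfl
        | cons q qs => simp at h1
      subst hps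
      simp [pvF]
    · -- first index of the minimum is 0 : p is the minimum
      have hpm : p = List.foldl min p ps := by
        have := pv_index?_getElem? h2
        simpa using this
      cases ps with
      | nil => simp at h1
      | cons q qs =>
        rw [PySem.List.slice_from_one]
        show ((calculate_max_loss (q :: qs) loss : Int) : WithTop Int) = _
        rw [ih q qs (by simp at hlen ⊢; omega) loss]
        have hpq : p ≤ q := hpm ▸ hmle q (by simp)
        have hle : ((min loss 0 : Int) : WithTop Int) ≤ ((q - p : Int) : WithTop Int) :=
          WithTop.coe_le_coe.mpr (by omega)
        rw [pvF_cons, max_eq_right hpq, ← min_assoc, min_eq_left hle]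
    · -- minimum at the last position
      have hps : ps ≠ [] := by
        intro h; subst h
        refine h2 ?_
        simpa using h3
      have hlast : ps.getLast? = some (List.foldl min p ps) := by
        have h := pv_index?_getElem? h3
        cases ps with
        | nil => exact absurd rfl hps
        | cons q qs =>
          rw [List.getLast?_eq_getElem?]
          simpa using h
      obtain ⟨mid, hmid⟩ := List.getLast?_eq_some_iff.mp hlast
      set m := List.foldl min p ps with hm
      set M := List.foldl max p mid with hM
      have hmp : m ≤ p := hmle p (by simp)
      have hpM : p ≤ M := (PySem.List.le_foldl_max mid p).1
      have hfold : List.foldl max p ps = M := by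
        conv_lhs => rw [hmid]
        rw [List.foldl_append]
        simp only [List.foldl_cons, List.foldl_nil]
        exact max_eq_left (by omega)
      rw [PySem.List.max?_id_cons, Option.getD_some, hfold]
      have hFps : pvF p ps = min (pvF p mid) ((m - M : Int) : WithTop Int) := by
        conv_lhs => rw [hmid]
        rw [pvF_append, ← hM, pvF_single]
      have hge : ((m - M : Int) : WithTop Int) ≤ pvF p mid :=
        pvF_ge m M mid
          (fun x hx => hmle x (by
            have : x ∈ ps := by rw [hmid]; exact List.mem_append_left _ hx
            simp [this]))
          (fun x hx => (PySem.List.le_foldl_max mid p).2 x hx)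
          p hpM
      rw [hFps, min_eq_right hge, ← WithTop.coe_min]
    · -- minimum strictly inside : split at it
      have hmem : List.foldl min p ps ∈ p :: ps := by
        rcases PySem.List.foldl_min_mem ps p with h | h
        · simp [h]
        · simp [h]
      obtain ⟨k0, hk0⟩ : ∃ k0, PySem.List.index? (p :: ps) (List.foldl min p ps) = some k0 := by
        have := (PySem.List.index?_isSome_iff (xs := p :: ps)
          (v := List.foldl min p ps)).mpr hmem
        exact Option.isSome_iff_exists.mp this
      have hget := pv_index?_getElem? hk0
      have hk0len : k0 < ps.length + 1 := by
        have := List.getElem?_eq_some_iff.mp hget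
        simpa using this.1
      rcases k0 with _ | j
      · exact absurd hk0 h2
      have hjlt : j + 1 < ps.length + 1 := hk0len
      have hjne : j + 1 ≠ ps.length := by
        intro h
        apply h3
        rw [hk0]
        simp [h]
      have hj : ps[j]? = some (List.foldl min p ps) := by
        simpa using hget
      have hjlen : j < ps.length := by omega
      have hjlen2 : j + 1 < ps.length := by omega
      rw [hk0]
      simp only [Option.getD_some]
      set m := List.foldl min p ps with hm
      -- slices
      have hll : PySem.List.slice (p :: ps) none (some ((j + 1 : Nat) : Int))
          = p :: ps.take j := by
        rw [PySem.List.slice_to _ (by positivity)]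
        have : (((j + 1 : Nat) : Int)).toNat = j + 1 := by omega
        rw [this]
        simp [List.take_succ_cons]
      have hrl : PySem.List.slice (p :: ps) (some (((j + 1 : Nat) : Int) + 1)) none
          = ps.drop (j + 1) := by
        rw [PySem.List.slice_from _ (by positivity)]
        have : ((((j + 1 : Nat) : Int)) + 1).toNat = j + 2 := by omega
        rw [this]
        rfl
      rw [hll, hrl]
      set tk := ps.take j with htk
      set dr := ps.drop (j + 1) with hdr
      set M := List.foldl max p tk with hM
      rw [PySem.List.max?_id_cons, Option.getD_some, ← hM]
      -- facts
      have hml : ∀ x ∈ ps, m ≤ x := fun x hx => hmle x (by simp [hx])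
      have hmp : m ≤ p := hmle p (by simp)
      have hpM : p ≤ M := (PySem.List.le_foldl_max tk p).1
      have htkM : ∀ x ∈ tk, x ≤ M := (PySem.List.le_foldl_max tk p).2
      have hjv : ps[j] = m := by
        obtain ⟨_, hv⟩ := List.getElem?_eq_some_iff.mp hj
        exact hv
      have hsplit : ps = tk ++ m :: dr := by
        conv_lhs => rw [← List.take_append_drop j ps]
        rw [List.drop_eq_getElem_cons hjlen, hjv, htk, hdr]
      have hdrne : dr ≠ [] := by
        rw [hdr]
        intro h
        have := List.drop_eq_nil_iff.mp h
        omega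
      obtain ⟨rh, rt, hrhrt⟩ := List.exists_cons_of_ne_nil hdrne
      rw [hrhrt]
      have hlen2 : (rh :: rt).length ≤ n := by
        have hd : dr.length = ps.length - (j + 1) := by rw [hdr]; simp
        rw [hrhrt] at hd
        simp only [List.length_cons] at hd hlen ⊢
        omega
      rw [ih rh rt hlen2]
      -- both sides as explicit minima
      set loss' := min (min 0 loss) (m - M) with hloss'
      have hl'0 : min loss' 0 = loss' := min_eq_left (by omega)
      rw [hl'0]
      have hFps : pvF p ps
          = min (pvF p tk)
              (min ((m - M : Int) : WithTop Int)
                (min ((rh - M : Int) : WithTop Int) (pvF (max M rh) rt))) := by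
        conv_lhs => rw [hsplit]
        rw [pvF_append, ← hM, pvF_cons, max_eq_left (by omega), hrhrt, pvF_cons]
      rw [hFps]
      -- inequality facts
      have hFtk : ((m - M : Int) : WithTop Int) ≤ pvF p tk :=
        pvF_ge m M tk
          (fun x hx => hml x (List.take_subset j ps hx))
          htkM p hpM
      have hrh : m ≤ rh := hml rh (List.drop_subset (j+1) ps (by rw [← hdr, hrhrt]; simp))
      have hrt : ∀ x ∈ rt, m ≤ x := fun x hx =>
        hml x (List.drop_subset (j+1) ps (by rw [← hdr, hrhrt]; simp [hx]))
      have hkey : min ((m - M : Int) : WithTop Int) (pvF rh rt) ≤ pvF (max M rh) rt :=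
        pvF_key m rt hrt M rh
      have hmono : pvF (max M rh) rt ≤ pvF rh rt := pvF_mono rt (le_max_right M rh)
      -- antisymmetry
      apply le_antisymm
      · -- loss'-side ≤ l0-side
        apply le_min
        · -- ≤ ↑(min loss 0)
          exact le_trans (min_le_left _ _) (WithTop.coe_le_coe.mpr (by omega))
        · apply le_min
          · -- ≤ pvF p tk
            exact le_trans (min_le_left _ _)
              (le_trans (WithTop.coe_le_coe.mpr (by omega)) hFtk)
          · apply le_min
            · exact le_trans (min_le_left _ _) (WithTop.coe_le_coe.mpr (by omega))
            · apply le_min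
              · exact le_trans (min_le_left _ _) (WithTop.coe_le_coe.mpr (by omega))
              · -- ≤ pvF (max M rh) rt
                refine le_trans (le_min ?_ (min_le_right _ _)) hkey
                exact le_trans (min_le_left _ _) (WithTop.coe_le_coe.mpr (by omega))
      · -- l0-side ≤ loss'-side
        apply le_min
        · -- ≤ ↑loss'
          have hs : ((loss' : Int) : WithTop Int)
              = min ((min loss 0 : Int) : WithTop Int) ((m - M : Int) : WithTop Int) := by
            rw [← WithTop.coe_min, WithTop.coe_inj]
            omega
          rw [hs]
          apply le_min
          · exact min_le_left _ _
          · exact le_trans (min_le_right _ _)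
              (le_trans (min_le_right _ _) (min_le_left _ _))
        · -- ≤ pvF rh rt
          exact le_trans (min_le_right _ _) (le_trans (min_le_right _ _)
            (le_trans (min_le_right _ _) (le_trans (min_le_right _ _) hmono)))

-- ===== VERDICT (by name: the statement is the Claim_ definition above) =====
theorem calculate_max_loss_spec : Claim_equal_calculate_max_loss := by
  intro prices loss _ hpre
  unfold Spec_calculate_max_loss
  match prices, hpre with
  | p :: ps, _ =>
    have hA := pv_A_eq (p :: ps).length p ps le_rfl loss
    have hB := pv_alt_eq p ps loss
    have : ((calculate_max_loss (p :: ps) loss : Int) : WithTop Int)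
        = ((calculate_max_loss_alt (p :: ps) loss : Int) : WithTop Int) := by rw [hA, hB]
    exact_mod_cast this
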